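-- pv_equiv track=rewrite | github.com/ilyalukibanov/homeworks | Algorithms and Data Structures/8. Trees/2B 8 B.py | search
-- ===== SOURCE A (Python) =====
-- def search(child, parent, tree):
--     if child in tree:
--         if tree[child] == parent:
--             return 1
--         else:
--             return search(tree[child], parent, tree)
--     else:
--         return 0
-- ===== SOURCE B (Python) =====
-- def _chain(node, rest):
--     # ancestors of node; every visited key is popped, so the mapping shrinks
--     # at each call and even cyclic parent pointers terminate
--     if node not in rest:
--         return []
--     p = rest.pop(node)
--     return [p] + _chain(p, rest)
--
-- def search(child, parent, tree):
--     # collect the whole ancestor chain on a private, shrinking copy of the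
--     # mapping, then answer with a single membership test
--     return 1 if parent in _chain(child, dict(tree)) else 0
-- ===== Notes on version B (the rewrite author's own statement) =====
-- stated objective: alternative
-- what changed: Replaces A's per-step recursive parent test on a fixed tree by a recursive helper that collects the whole ancestor chain while consuming a shrinking private copy of the mapping (each visited key is popped, so cycles cannot loop), followed by a single membership test.
import Mathlib
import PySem

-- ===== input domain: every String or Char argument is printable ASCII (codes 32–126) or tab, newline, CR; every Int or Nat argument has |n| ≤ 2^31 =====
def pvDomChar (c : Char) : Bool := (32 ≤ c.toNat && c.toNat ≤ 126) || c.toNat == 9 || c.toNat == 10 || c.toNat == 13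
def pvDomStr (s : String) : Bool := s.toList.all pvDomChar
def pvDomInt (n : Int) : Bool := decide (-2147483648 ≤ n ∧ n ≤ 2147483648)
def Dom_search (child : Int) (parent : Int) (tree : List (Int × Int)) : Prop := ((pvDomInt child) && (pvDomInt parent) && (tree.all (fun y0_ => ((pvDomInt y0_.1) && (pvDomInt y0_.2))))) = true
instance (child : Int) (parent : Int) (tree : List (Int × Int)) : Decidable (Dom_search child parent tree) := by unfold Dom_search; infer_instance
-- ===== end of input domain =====

-- B collects the ancestor chain with a recursive helper over a shrinking private copy of the
-- mapping (each visited key is removed, so the recursion is structural and cycle-safe) and then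
-- does one membership test; alternative decomposition, same cost. On cyclic chains (outside
-- Pre_search) A raises RecursionError while B returns a value.


-- ===== PORT A =====
-- dict lookup on the association list (first match = unique-keys dict lookup)
def pvLookup (tree : List (Int × Int)) (k : Int) : Option Int :=
  match tree.find? (fun p => p.1 == k) with
  | some p => some p.2
  | none => none

-- A's recursion, with a fuel guard for totality only: under Pre_search the fuel never runs out.
def searchFuel (fuel : Nat) (child : Int) (parent : Int) (tree : List (Int × Int)) : Int :=
  match fuel with
  | 0 => 0
  | f + 1 =>
    match pvLookup tree child with
    | none => 0
    | some v => if v = parent then 1 else searchFuel f v parent tree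

def search (child : Int) (parent : Int) (tree : List (Int × Int)) : Int :=
  searchFuel (tree.length + 2) child parent tree

-- ===== PORT B =====
-- _chain: the ancestor list of `node`; the matched key is popped from the private copy, so the
-- mapping shrinks at every call and the recursion is well-founded on its length (no fuel).
def bChain (node : Int) (rest : List (Int × Int)) : List Int :=
  match h : rest.find? (fun e => e.1 == node) with
  | none => []
  | some q => [q.2] ++ bChain q.2 (rest.eraseP (fun e => e.1 == node))
termination_by rest.length
decreasing_by
  have hmem : q ∈ rest := List.mem_of_find?_eq_some h
  have hlen := List.length_eraseP_of_mem (p := fun e => e.1 == node) hmem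
    (List.find?_some (p := fun (e : Int × Int) => e.1 == node) h)
  have : 0 < rest.length := List.length_pos_of_mem hmem
  omega

def search_alt (child : Int) (parent : Int) (tree : List (Int × Int)) : Int :=
  if parent ∈ bChain child tree then 1 else 0

-- ===== PRECONDITION & SPEC =====
-- chase tree c i = the i-th node of the parent chain starting at c (none once the chain left the keys)
def chase (tree : List (Int × Int)) (node : Int) : Nat → Option Int
  | 0 => some node
  | i + 1 =>
    match chase tree node i with
    | none => none
    | some m => pvLookup tree m

-- Pre_ excludes exactly the inputs on which A diverges (RecursionError): the parent chain from
-- child neither leaves the key set nor reaches parent; within length+1 steps one of the two must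
-- occur on every input where A returns.
def Pre_search (child : Int) (parent : Int) (tree : List (Int × Int)) : Prop :=
  ∃ i < tree.length + 2, 1 ≤ i ∧
    (chase tree child i = none ∨ chase tree child i = some parent)

instance (child : Int) (parent : Int) (tree : List (Int × Int)) : Decidable (Pre_search child parent tree) := by
  unfold Pre_search; infer_instance

def pvWitness_search : Int × Int × (List (Int × Int)) := (1, 2, [(1, 2)])

def Spec_search (child : Int) (parent : Int) (tree : List (Int × Int)) (out : Int) : Prop := out = search_alt child parent tree
instance (child : Int) (parent : Int) (tree : List (Int × Int)) (out : Int) : Decidable (Spec_search child parent tree out) := by unfold Spec_search; infer_instance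

-- ===== CLAIM =====
def Claim_equal_search : Prop := ∀ (child : Int) (parent : Int) (tree : List (Int × Int)), Dom_search child parent tree → Pre_search child parent tree → Spec_search child parent tree (search child parent tree)

-- ===== LEMMAS AND PROOFS =====

-- unfolding equations for bChain (well-founded definition)
lemma bChain_nil (node : Int) (rest : List (Int × Int))
    (h : rest.find? (fun e => e.1 == node) = none) : bChain node rest = [] := by
  rw [bChain.eq_def, h]

lemma bChain_cons (node : Int) (rest : List (Int × Int)) (q : Int × Int)
    (h : rest.find? (fun e => e.1 == node) = some q) :
    bChain node rest = q.2 :: bChain q.2 (rest.eraseP (fun e => e.1 == node)) := by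
  rw [bChain.eq_def, h]
  rfl

-- removing the entry of a DIFFERENT key does not change a lookup
lemma lookup_eraseP (t : List (Int × Int)) (c m : Int) (hne : m ≠ c) :
    pvLookup (t.eraseP (fun q => q.1 == c)) m = pvLookup t m := by
  induction t with
  | nil => rfl
  | cons a t ih =>
    by_cases hc : a.1 = c
    · have he : List.eraseP (fun q => q.1 == c) (a :: t) = t := by
        simp [hc]
      rw [he]
      have hcm : (c == m) = false := beq_eq_false_iff_ne.mpr (Ne.symm hne)
      simp [pvLookup, List.find?, hc, hcm]
    · have he : List.eraseP (fun q => q.1 == c) (a :: t) =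
        a :: t.eraseP (fun q => q.1 == c) := by
        simp [hc]
      rw [he]
      by_cases hm : a.1 = m
      · simp [pvLookup, List.find?, hm]
      · simp only [pvLookup, List.find?] at ih ⊢
        simp only [show (a.1 == m) = false by simp [hm]] at *
        exact ih

lemma chase_step (tree : List (Int × Int)) (c v : Int) (hv : pvLookup tree c = some v) :
    ∀ i, chase tree c (i + 1) = chase tree v i := by
  intro i
  induction i with
  | zero => simp [chase, hv]
  | succ k ih => rw [chase, ih]; rfl

lemma chase_shift (tree : List (Int × Int)) (c : Int) (i j : Nat)
    (h : chase tree c i = chase tree c j) :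
    ∀ k, chase tree c (i + k) = chase tree c (j + k) := by
  intro k
  induction k with
  | zero => simpa using h
  | succ m ih =>
    show chase tree c ((i + m) + 1) = chase tree c ((j + m) + 1)
    rw [chase, chase, ih]

lemma walk (tree : List (Int × Int)) (parent : Int) :
    ∀ j fA node (t : List (Int × Int)),
    1 ≤ j → j < fA →
    (chase tree node j = none ∨ chase tree node j = some parent) →
    (∀ i, 1 ≤ i → i < j → chase tree node i ≠ none ∧ chase tree node i ≠ some parent) →
    (∀ i1 i2, i1 < i2 → i2 < j → chase tree node i1 ≠ chase tree node i2) →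
    (∀ i, i < j → ∀ m, chase tree node i = some m → pvLookup t m = pvLookup tree m) →
    searchFuel fA node parent tree = (if parent ∈ bChain node t then 1 else 0) := by
  intro j
  induction j with
  | zero => intro _ _ _ h; omega
  | succ k ih =>
    intro fA node t _ hfA hstop hmin hnodup hlook
    obtain ⟨a, rfl⟩ : ∃ a, fA = a + 1 := ⟨fA - 1, by omega⟩
    have h0 : pvLookup t node = pvLookup tree node :=
      hlook 0 (by omega) node (by simp [chase])
    cases hl : pvLookup tree node with
    | none =>
      have hf : t.find? (fun e => e.1 == node) = none := by
        rw [hl] at h0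
        unfold pvLookup at h0
        cases hf : t.find? (fun e => e.1 == node) with
        | none => rfl
        | some p => rw [hf] at h0; exact absurd h0 (by simp)
      rw [bChain_nil node t hf]
      simp [searchFuel, hl]
    | some v =>
      have h1 : chase tree node 1 = some v := by simp [chase, hl]
      obtain ⟨p, hp, hpv⟩ : ∃ p, t.find? (fun e => e.1 == node) = some p ∧ p.2 = v := by
        rw [hl] at h0
        unfold pvLookup at h0
        cases hf : t.find? (fun e => e.1 == node) with
        | none => rw [hf] at h0; exact absurd h0 (by simp)
        | some p => rw [hf] at h0; exact ⟨p, rfl, by injection h0⟩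
      rw [bChain_cons node t p hp, hpv]
      rcases Nat.lt_or_ge 1 (k + 1) with hk | hk
      · -- the stop is further on: v ≠ parent, recurse on the tail
        have hv_ne : v ≠ parent := by
          intro h; exact (hmin 1 le_rfl hk).2 (by rw [h1, h])
        have htr : ∀ i, chase tree v i = chase tree node (i + 1) :=
          fun i => (chase_step tree node v hl i).symm
        have hrec := ih a v (t.eraseP (fun e => e.1 == node)) (by omega) (by omega)
          (by rw [htr k]; exact hstop)
          (by intro i h1i hik; rw [htr i]; exact hmin (i + 1) (by omega) (by omega))
          (by intro i1 i2 h12 h2k; rw [htr i1, htr i2]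
              exact hnodup (i1 + 1) (i2 + 1) (by omega) (by omega))
          (by intro i hik m hm
              rw [htr i] at hm
              have hm_node : m ≠ node := by
                intro h
                exact hnodup 0 (i + 1) (by omega) (by omega) (by rw [hm, h]; rfl)
              rw [lookup_eraseP t node m hm_node]
              exact hlook (i + 1) (by omega) m hm)
        simp only [searchFuel, hl, if_neg hv_ne, hrec, List.mem_cons]
        simp [Ne.symm hv_ne]
      · -- k = 0 : the stop is right here; chase 1 cannot be none, so v = parent
        have hk0 : k = 0 := by omega
        subst hk0
        rcases hstop with hstop | hstop
        · rw [h1] at hstop; exact absurd hstop (by simp)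
        · rw [h1] at hstop
          have hv : v = parent := by injection hstop
          subst hv
          simp [searchFuel, hl]

-- ===== VERDICT =====
theorem search_spec : Claim_equal_search := by
  intro child parent tree _hdom hpre
  unfold Spec_search search search_alt
  obtain ⟨i0, hi0lt, hi01, hi0stop⟩ := hpre
  have hex : ∃ i, 1 ≤ i ∧ (chase tree child i = none ∨ chase tree child i = some parent) :=
    ⟨i0, hi01, hi0stop⟩
  classical
  set j := Nat.find hex with hj
  have hjspec := Nat.find_spec hex
  have hjmin : ∀ i < j, ¬(1 ≤ i ∧ (chase tree child i = none ∨ chase tree child i = some parent)) :=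
    fun i hi => Nat.find_min hex hi
  have hjle : j ≤ i0 := Nat.find_min' hex ⟨hi01, hi0stop⟩
  have hmin : ∀ i, 1 ≤ i → i < j → chase tree child i ≠ none ∧ chase tree child i ≠ some parent := by
    intro i h1 hij
    constructor
    · intro h; exact hjmin i hij ⟨h1, Or.inl h⟩
    · intro h; exact hjmin i hij ⟨h1, Or.inr h⟩
  have hnodup : ∀ i1 i2, i1 < i2 → i2 < j → chase tree child i1 ≠ chase tree child i2 := by
    intro i1 i2 h12 h2j heq
    have hshift := chase_shift tree child i1 i2 heq
    have hkey : chase tree child (i1 + (j - i2)) = chase tree child j := by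
      rw [hshift (j - i2)]
      congr 1
      omega
    have h1j : 1 ≤ j := hjspec.1
    have hlt : i1 + (j - i2) < j := by omega
    have hge : 1 ≤ i1 + (j - i2) := by omega
    rcases hjspec.2 with hs | hs
    · exact (hmin _ hge hlt).1 (by rw [hkey, hs])
    · exact (hmin _ hge hlt).2 (by rw [hkey, hs])
  exact walk tree parent j (tree.length + 2) child tree
    hjspec.1 (by omega) hjspec.2 hmin hnodup (by intro i _ m _; rfl)
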